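-- pv_equiv track=rewrite | github.com/fuzzy-dynamics/putnam-2025 | verify/A1_correct.py | simulate_sequence
-- ===== SOURCE A (Python) =====
-- from math import gcd
--
-- def simulate_sequence(m0, n0, max_steps=200):
--     """
--     Simulate the sequence and return the first k where d_k = 1
--     and remains 1 forever (within our check horizon).
--     """
--     m, n = m0, n0
--
--     # Find when d_k first becomes 1
--     first_one = None
--
--     for k in range(max_steps):
--         a = 2*m + 1
--         b = 2*n + 1
--         d = gcd(a, b)
--
--         if d == 1 and first_one is None:
--             first_one = k
--
--         if d > 1:
--             first_one = None  # Reset if we see d > 1 again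
--
--         # Next step
--         m = a // d
--         n = b // d
--
--     # After max_steps, check if we've stabilized at d=1
--     # Verify the last 50 steps all have d=1
--     m, n = m0, n0
--     for k in range(max_steps):
--         a = 2*m + 1
--         b = 2*n + 1
--         d = gcd(a, b)
--         m = a // d
--         n = b // d
--
--     # Now check next 50 steps
--     all_one = True
--     for k in range(50):
--         a = 2*m + 1
--         b = 2*n + 1
--         d = gcd(a, b)
--         if d > 1:
--             all_one = False
--             break
--         m = a // d
--         n = b // d
--
--     return first_one, all_one
-- ===== SOURCE B (Python) =====
-- from math import gcd
--
-- def simulate_sequence(m0, n0, max_steps=200):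
--     # Different algorithm: compute the whole d-sequence once, then read the
--     # answers off it -- first_one is the start index of the trailing run of
--     # 1s among the first max_steps values (found by a backward scan), and
--     # all_one says the following 50 values are all 1.
--     steps = max_steps if max_steps > 0 else 0
--     ds = []
--     m, n = m0, n0
--     for _ in range(steps + 50):
--         a = 2*m + 1
--         b = 2*n + 1
--         d = gcd(a, b)
--         ds.append(d)
--         m = a // d
--         n = b // d
--     run = 0
--     for d in reversed(ds[:steps]):
--         if d != 1:
--             break
--         run += 1
--     first_one = steps - run if run > 0 else None
--     all_one = all(d == 1 for d in ds[steps:])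
--     return first_one, all_one
-- ===== Notes on version B (the rewrite author's own statement) =====
-- stated objective: alternative
-- what changed: A maintains a reset-on-d>1 accumulator for first_one and then re-simulates all max_steps steps a second time before the 50-step check; B materialises the d-sequence once (max_steps+50 values) and derives first_one as the start of the trailing run of 1s by a backward scan and all_one by checking the last 50 values.
import Mathlib
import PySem

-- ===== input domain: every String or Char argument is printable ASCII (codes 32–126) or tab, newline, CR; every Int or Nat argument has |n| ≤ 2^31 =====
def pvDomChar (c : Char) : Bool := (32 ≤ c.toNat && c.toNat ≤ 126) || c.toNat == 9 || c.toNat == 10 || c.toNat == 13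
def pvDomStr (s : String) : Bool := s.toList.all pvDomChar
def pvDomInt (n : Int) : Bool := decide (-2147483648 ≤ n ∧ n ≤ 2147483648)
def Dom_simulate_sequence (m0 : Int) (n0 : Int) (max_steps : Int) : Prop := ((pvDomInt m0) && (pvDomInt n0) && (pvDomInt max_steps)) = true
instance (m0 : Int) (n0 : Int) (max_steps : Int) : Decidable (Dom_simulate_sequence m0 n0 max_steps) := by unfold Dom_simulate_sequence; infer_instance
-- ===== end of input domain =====

-- B computes the d-sequence once and reads first_one off its trailing run of 1s (backward scan), instead of A's reset accumulator plus a second full re-simulation; return-value equivalence, no side effects involved.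

-- ===== PORT A =====
-- A's first loop: for k in range(max_steps), tracking only first_one
-- (math.gcd = Int.gcd, '//' = PySem.Int.floordiv)
def simulate_sequence_loop1 : Nat → Int → Int → Int → Option Int → Option Int
  | 0, _, _, _, first_one => first_one
  | fuel+1, k, m, n, first_one =>
    let a := 2*m + 1
    let b := 2*n + 1
    let d : Int := Int.gcd a b
    let fo1 := if d = 1 ∧ first_one = none then some k else first_one
    let fo2 := if d > 1 then none else fo1
    simulate_sequence_loop1 fuel (k+1) (PySem.Int.floordiv a d) (PySem.Int.floordiv b d) fo2

-- A's second loop: re-simulate max_steps steps to rebuild (m, n)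
def simulate_sequence_loop2 : Nat → Int → Int → Int × Int
  | 0, m, n => (m, n)
  | fuel+1, m, n =>
    let a := 2*m + 1
    let b := 2*n + 1
    let d : Int := Int.gcd a b
    simulate_sequence_loop2 fuel (PySem.Int.floordiv a d) (PySem.Int.floordiv b d)

-- A's third loop: check the next 50 steps, break on d > 1
def simulate_sequence_check : Nat → Int → Int → Bool
  | 0, _, _ => true
  | fuel+1, m, n =>
    let a := 2*m + 1
    let b := 2*n + 1
    let d : Int := Int.gcd a b
    if d > 1 then false
    else simulate_sequence_check fuel (PySem.Int.floordiv a d) (PySem.Int.floordiv b d)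

def simulate_sequence (m0 : Int) (n0 : Int) (max_steps : Int) : Option Int × Bool :=
  -- range(max_steps) iterates max_steps.toNat times (empty if max_steps ≤ 0)
  let first_one := simulate_sequence_loop1 max_steps.toNat 0 m0 n0 none
  let mn := simulate_sequence_loop2 max_steps.toNat m0 n0
  (first_one, simulate_sequence_check 50 mn.1 mn.2)

-- ===== PORT B =====
-- B's single forward pass building the list ds of gcd values
def simulate_sequence_alt_ds : Nat → Int → Int → List Int
  | 0, _, _ => []
  | fuel+1, m, n =>
    let a := 2*m + 1
    let b := 2*n + 1
    let d : Int := Int.gcd a b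
    d :: simulate_sequence_alt_ds fuel (PySem.Int.floordiv a d) (PySem.Int.floordiv b d)

-- B's backward scan: Python's for-with-break over reversed(ds[:steps]),
-- counting the leading 1s of the reversed prefix
def simulate_sequence_alt_run : List Int → Nat
  | [] => 0
  | d :: rest => if d ≠ 1 then 0 else simulate_sequence_alt_run rest + 1

def simulate_sequence_alt (m0 : Int) (n0 : Int) (max_steps : Int) : Option Int × Bool :=
  let steps : Int := if max_steps > 0 then max_steps else 0
  -- range(steps + 50) iterates (steps+50).toNat times
  let ds := simulate_sequence_alt_ds (steps + 50).toNat m0 n0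
  -- ds[:steps] / ds[steps:] with 0 ≤ steps ≤ len ds are exactly take/drop
  let run : Nat := simulate_sequence_alt_run (ds.take steps.toNat).reverse
  let first_one : Option Int := if run > 0 then some (steps - run) else none
  let all_one : Bool := (ds.drop steps.toNat).all (fun d => d == 1)
  (first_one, all_one)

-- ===== PRECONDITION & SPEC =====
def Spec_simulate_sequence (m0 : Int) (n0 : Int) (max_steps : Int) (out : Option Int × Bool) : Prop := out = simulate_sequence_alt m0 n0 max_steps
instance (m0 : Int) (n0 : Int) (max_steps : Int) (out : Option Int × Bool) : Decidable (Spec_simulate_sequence m0 n0 max_steps out) := by unfold Spec_simulate_sequence; infer_instance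

-- ===== CLAIM (what is proved, stated in full; the proofs are below) =====
def Claim_equal_simulate_sequence : Prop := ∀ (m0 : Int) (n0 : Int) (max_steps : Int), Dom_simulate_sequence m0 n0 max_steps → Spec_simulate_sequence m0 n0 max_steps (simulate_sequence m0 n0 max_steps)

-- ===== LEMMAS AND PROOFS =====

-- every d in the sequence is ≥ 1 (gcd of odd numbers is positive)
theorem pv_gcd_pos (m n : Int) : 1 ≤ ((Int.gcd (2*m+1) (2*n+1) : Nat) : Int) := by
  have h : Int.gcd (2*m+1) (2*n+1) ≠ 0 := by
    intro h
    rcases Int.gcd_eq_zero_iff.mp h with ⟨h1, _⟩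
    omega
  omega

theorem alt_ds_pos (fuel : Nat) : ∀ (m n d : Int), d ∈ simulate_sequence_alt_ds fuel m n → 1 ≤ d := by
  induction fuel with
  | zero => intro m n d h; simp [simulate_sequence_alt_ds] at h
  | succ f ih =>
    intro m n d h
    simp only [simulate_sequence_alt_ds, List.mem_cons] at h
    rcases h with h | h
    · subst h; exact pv_gcd_pos m n
    · exact ih _ _ _ h

theorem alt_ds_length (fuel : Nat) : ∀ (m n : Int), (simulate_sequence_alt_ds fuel m n).length = fuel := by
  induction fuel with
  | zero => intro m n; rfl
  | succ f ih => intro m n; simp only [simulate_sequence_alt_ds, List.length_cons, ih]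

theorem alt_ds_append (f g : Nat) : ∀ (m n : Int),
    simulate_sequence_alt_ds (f + g) m n =
      simulate_sequence_alt_ds f m n ++
        simulate_sequence_alt_ds g (simulate_sequence_loop2 f m n).1 (simulate_sequence_loop2 f m n).2 := by
  induction f with
  | zero => intro m n; simp [simulate_sequence_alt_ds, simulate_sequence_loop2]
  | succ f ih =>
    intro m n
    have : f + 1 + g = (f + g) + 1 := by omega
    rw [this]
    simp only [simulate_sequence_alt_ds, simulate_sequence_loop2, List.cons_append]
    rw [ih]

-- A's 50-step check equals "all values of the 50-step d-sequence are 1"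
theorem check_eq_all (fuel : Nat) : ∀ (m n : Int),
    simulate_sequence_check fuel m n = (simulate_sequence_alt_ds fuel m n).all (fun d => d == 1) := by
  induction fuel with
  | zero => intro m n; rfl
  | succ f ih =>
    intro m n
    simp only [simulate_sequence_check, simulate_sequence_alt_ds, List.all_cons]
    have hpos := pv_gcd_pos m n
    by_cases h : ((Int.gcd (2*m+1) (2*n+1) : Nat) : Int) > 1
    · simp only [if_pos h]
      have : (((Int.gcd (2*m+1) (2*n+1) : Nat) : Int) == 1) = false := by
        simp; omega
      rw [this]; simp
    · have h1 : ((Int.gcd (2*m+1) (2*n+1) : Nat) : Int) = 1 := by omega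
      simp only [h1]
      simp [ih]

-- A's first loop rephrased over the list of d values
def pvG : List Int → Int → Option Int → Option Int
  | [], _, fo => fo
  | d :: ds, k, fo =>
    let fo1 := if d = 1 ∧ fo = none then some k else fo
    let fo2 := if d > 1 then none else fo1
    pvG ds (k+1) fo2

theorem loop1_eq_g (fuel : Nat) : ∀ (k m n : Int) (fo : Option Int),
    simulate_sequence_loop1 fuel k m n fo = pvG (simulate_sequence_alt_ds fuel m n) k fo := by
  induction fuel with
  | zero => intro k m n fo; rfl
  | succ f ih =>
    intro k m n fo
    simp only [simulate_sequence_loop1, simulate_sequence_alt_ds, pvG]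
    exact ih _ _ _ _

theorem g_snoc (ds : List Int) : ∀ (d k : Int) (fo : Option Int),
    pvG (ds ++ [d]) k fo =
      (let fo' := pvG ds k fo
       let fo1 := if d = 1 ∧ fo' = none then some (k + (ds.length : Int)) else fo'
       if d > 1 then none else fo1) := by
  induction ds with
  | nil => intro d k fo; simp [pvG]
  | cons e ds ih =>
    intro d k fo
    simp only [List.cons_append, pvG, ih, List.length_cons]
    have : k + 1 + (ds.length : Int) = k + ((ds.length : Nat) + 1 : Nat) := by push_cast; ring
    rw [this]

-- the trailing-run characterisation of A's first loop
theorem g_char (ds : List Int) (hpos : ∀ d ∈ ds, 1 ≤ d) :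
    pvG ds 0 none =
      (if simulate_sequence_alt_run ds.reverse = 0 then none
       else some ((ds.length : Int) - (simulate_sequence_alt_run ds.reverse : Int))) := by
  induction ds using List.reverseRecOn with
  | nil => rfl
  | append_singleton ds d ih =>
    have hd : 1 ≤ d := hpos d (by simp)
    have hds : ∀ e ∈ ds, 1 ≤ e := fun e he => hpos e (by simp [he])
    have ihs := ih hds
    rw [g_snoc]
    simp only [List.reverse_append, List.reverse_singleton, List.singleton_append,
      simulate_sequence_alt_run, List.length_append, List.length_singleton]
    by_cases h1 : d = 1
    · have hng : ¬ d > 1 := by omega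
      simp only [h1]
      -- d = 1 branch
      by_cases hr : simulate_sequence_alt_run ds.reverse = 0
      · have hfo : pvG ds 0 none = none := by rw [ihs, if_pos hr]
        simp [hfo, hr]
      · have hfo : pvG ds 0 none = some ((ds.length : Int) - (simulate_sequence_alt_run ds.reverse : Int)) := by
          rw [ihs, if_neg hr]
        simp [hfo, hr]
    · have hg : d > 1 := by omega
      simp [if_pos hg, h1]

-- ===== VERDICT (by name: the statement is the Claim_ definition above) =====
theorem simulate_sequence_spec : Claim_equal_simulate_sequence := by
  intro m0 n0 max_steps _
  unfold Spec_simulate_sequence simulate_sequence simulate_sequence_alt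
  set s : Nat := max_steps.toNat with hs
  have hsteps : (if max_steps > 0 then max_steps else 0) = (s : Int) := by
    split <;> omega
  simp only [hsteps]
  have h50 : ((s : Int) + 50).toNat = s + 50 := by omega
  have hnat : ((s : Int)).toNat = s := by omega
  rw [h50, hnat, alt_ds_append s 50 m0 n0]
  have hlen := alt_ds_length s m0 n0
  rw [List.take_left' hlen, List.drop_left' hlen, Prod.mk.injEq]
  constructor
  · rw [loop1_eq_g, g_char _ (fun d hd => alt_ds_pos s m0 n0 d hd), hlen]
    by_cases hr : simulate_sequence_alt_run (simulate_sequence_alt_ds s m0 n0).reverse = 0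
    · simp [hr]
    · simp [hr, Nat.pos_of_ne_zero hr]
  · exact check_eq_all 50 _ _
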